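-- pv_equiv track=rewrite | github.com/ketan86/interview_material | lc_algorithm/company/karat/longest_repeating_patt_of_spending.py | find_users
-- ===== SOURCE A (Python) =====
-- def max_sub(a, b):
--     m = len(a)
--     n = len(b)
--
--     # dp to store the max length
--     dp = [[0] * (n+1) for i in range(m+1)]
--
--     mx = 0
--     for i in range(1, m+1):
--         for j in range(1, n+1):
--             # if category is same, calculate the max length by adding
--             # 1 to previous length
--             if a[i-1] == b[j-1]:
--                 dp[i][j] = dp[i-1][j-1] + 1
--                 # update max
--                 mx = max(mx, dp[i][j])
--     return mx
--
-- def find_users(userid_list, category_list):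
--     """
--     Steps :
--         1. Loop over the userid pair at a time
--         2. Find the size of the longest contiguous sub-sequence
--         3. Save sequence size -> userid pair for result
--         4. Keep running max sequence size
--         5. Return userid pair with max sequence size
--
--     """
--     # max to store the max count
--     mx = 0
--     # result dict with count as key and userids are values
--     res = {}
--
--     # iterate over the userids in two pair
--     for i in range(len(userid_list)):
--         for j in range(i + 1, len(userid_list)):
--             # find the length of the matching items
--             count = max_sub(
--                 category_list[userid_list[i]],
--                 category_list[userid_list[j]])
--             # use count to store the respective userids
--             res[count] = [userid_list[i], userid_list[j]]
--             # update the max length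
--             mx = max(mx, count)
--
--     # return the userids where length is longest
--     return res[mx]
-- ===== SOURCE B (Python) =====
-- def _longest_run(a, b):
--     # longest common contiguous run via diagonal scanning (no DP table)
--     m, n = len(a), len(b)
--     best = 0
--     for i0 in range(m):
--         streak = 0
--         for k in range(min(m - i0, n)):
--             if a[i0 + k] == b[k]:
--                 streak += 1
--                 if streak > best:
--                     best = streak
--             else:
--                 streak = 0
--     for j0 in range(1, n):
--         streak = 0
--         for k in range(min(m, n - j0)):
--             if a[k] == b[j0 + k]:
--                 streak += 1
--                 if streak > best:
--                     best = streak
--             else: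
--                 streak = 0
--     return best
--
-- def find_users(userid_list, category_list):
--     mx = 0
--     best = None
--     for i in range(len(userid_list)):
--         for j in range(i + 1, len(userid_list)):
--             count = _longest_run(category_list[userid_list[i]],
--                                  category_list[userid_list[j]])
--             if count >= mx:
--                 mx = count
--                 best = [userid_list[i], userid_list[j]]
--     return best
-- ===== Notes on version B (the rewrite author's own statement) =====
-- stated objective: alternative
-- what changed: The longest-common-contiguous-run helper is computed by scanning each diagonal alignment with a running streak counter (O(1) extra space) instead of building A's (m+1)x(n+1) DP table, and the pair loop tracks the best pair directly (count >= mx reproduces A's dict-overwrite last-pair-wins tie-break) instead of a count-keyed dict indexed at the end.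
import Mathlib
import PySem

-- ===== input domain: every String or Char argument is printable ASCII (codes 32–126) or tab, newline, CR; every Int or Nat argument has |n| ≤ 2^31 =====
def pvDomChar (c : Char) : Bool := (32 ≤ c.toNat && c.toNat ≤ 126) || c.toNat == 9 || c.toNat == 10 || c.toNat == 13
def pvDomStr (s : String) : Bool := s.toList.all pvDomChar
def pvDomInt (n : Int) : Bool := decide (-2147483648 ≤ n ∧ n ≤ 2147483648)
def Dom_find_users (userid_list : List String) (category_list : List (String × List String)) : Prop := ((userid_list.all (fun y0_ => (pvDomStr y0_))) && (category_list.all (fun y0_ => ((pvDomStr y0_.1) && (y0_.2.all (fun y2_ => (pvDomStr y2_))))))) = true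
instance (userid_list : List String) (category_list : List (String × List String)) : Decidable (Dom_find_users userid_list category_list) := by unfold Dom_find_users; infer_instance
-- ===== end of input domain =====

-- B replaces A's quadratic-space DP table for the longest common contiguous run by a
-- diagonal scan keeping only a running streak (O(1) extra space), and replaces A's
-- count-keyed result dict by directly tracking the best pair (count >= mx reproduces
-- A's last-pair-wins tie-break).  Return-value equivalence only; neither mutates input.

-- ===== PORT A =====
-- body of A's inner dp loop (Lean loop index i/j is Python's i-1/j-1, always in range;
-- dp[i][j] = st.1 entry; mx = st.2; Python reads dp[i][j] right after writing it, = v)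
def stepA (a b : List String) (i : Nat) (st : List (List Nat) × Nat) (j : Nat) :
    List (List Nat) × Nat :=
  if a.getD i "" = b.getD j "" then
    (st.1.set (i+1) ((st.1.getD (i+1) []).set (j+1) ((st.1.getD i []).getD j 0 + 1)),
     max st.2 ((st.1.getD i []).getD j 0 + 1))
  else st

def max_sub (a b : List String) : Nat :=
  let m := a.length
  let n := b.length
  -- dp = [[0] * (n+1) for i in range(m+1)]
  let dp : List (List Nat) := (List.range (m+1)).map (fun _ => List.replicate (n+1) 0)
  let st := (List.range m).foldl (fun st i => (List.range n).foldl (stepA a b i) st) (dp, 0)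
  st.2

def find_users (userid_list : List String) (category_list : List (String × List String)) :
    List String :=
  let st := (List.range userid_list.length).foldl (fun st i =>
      (List.range' (i + 1) (userid_list.length - (i + 1))).foldl
        (fun (st : PySem.Dict Nat (List String) × Nat) j =>
          let count := max_sub ((PySem.Dict.mk category_list).getD (userid_list.getD i "") [])
                               ((PySem.Dict.mk category_list).getD (userid_list.getD j "") [])
          (st.1.insert count [userid_list.getD i "", userid_list.getD j ""], max st.2 count))
        st)
    ((PySem.Dict.empty : PySem.Dict Nat (List String)), (0 : Nat))
  -- res[mx]: the key is present whenever Python returns (Pre_); outside Pre_ A raises KeyError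
  (st.1.get? st.2).getD []

-- ===== PORT B =====
-- body of B's diagonal walk: st = (streak, best); one diagonal starts at (i0, j0)
def stepW (a b : List String) (i0 j0 : Nat) (st : Nat × Nat) (k : Nat) : Nat × Nat :=
  if a.getD (i0 + k) "" = b.getD (j0 + k) "" then
    (st.1 + 1, if st.1 + 1 > st.2 then st.1 + 1 else st.2)
  else (0, st.2)

def lrun (a b : List String) : Nat :=
  let m := a.length
  let n := b.length
  let best1 := (List.range m).foldl (fun best i0 =>
      ((List.range (min (m - i0) n)).foldl (stepW a b i0 0) (0, best)).2) 0
  (List.range' 1 (n - 1)).foldl (fun best j0 =>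
      ((List.range (min m (n - j0))).foldl (stepW a b 0 j0) (0, best)).2) best1

def find_users_alt (userid_list : List String) (category_list : List (String × List String)) :
    List String :=
  let st := (List.range userid_list.length).foldl (fun st i =>
      (List.range' (i + 1) (userid_list.length - (i + 1))).foldl
        (fun (st : Nat × Option (List String)) j =>
          let count := lrun ((PySem.Dict.mk category_list).getD (userid_list.getD i "") [])
                            ((PySem.Dict.mk category_list).getD (userid_list.getD j "") [])
          if count ≥ st.1 then (count, some [userid_list.getD i "", userid_list.getD j ""]) else st)
        st)
    ((0 : Nat), (none : Option (List String)))
  -- Python B returns None when there is no pair; that happens only outside Pre_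
  st.2.getD []

-- ===== PRECONDITION & SPEC =====
-- Pre_ = exactly the inputs on which Python A returns: at least two userids (else res[mx]
-- raises KeyError) and every listed userid is a key of category_list (else KeyError)
def Pre_find_users (userid_list : List String) (category_list : List (String × List String)) : Prop :=
  2 ≤ userid_list.length ∧ ∀ u ∈ userid_list, u ∈ category_list.map Prod.fst

instance (userid_list : List String) (category_list : List (String × List String)) :
    Decidable (Pre_find_users userid_list category_list) := by
  unfold Pre_find_users; infer_instance

def pvWitness_find_users : List String × (List (String × List String)) :=
  (["a", "b"], [("a", ["x", "y"]), ("b", ["y", "x"])])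

def Spec_find_users (userid_list : List String) (category_list : List (String × List String))
    (out : List String) : Prop := out = find_users_alt userid_list category_list

instance (userid_list : List String) (category_list : List (String × List String))
    (out : List String) : Decidable (Spec_find_users userid_list category_list out) := by
  unfold Spec_find_users; infer_instance

-- ===== CLAIM (what is proved, stated in full; the proofs are below) =====
def Claim_equal_find_users : Prop := ∀ (userid_list : List String) (category_list : List (String × List String)), Dom_find_users userid_list category_list → Pre_find_users userid_list category_list → Spec_find_users userid_list category_list (find_users userid_list category_list)

-- ===== LEMMAS AND PROOFS =====

-- longest common suffix of a[:i] and b[:j] (the value A's dp[i][j] holds)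
def csl (a b : List String) : Nat → Nat → Nat
  | 0, _ => 0
  | _+1, 0 => 0
  | i+1, j+1 => if a.getD i "" = b.getD j "" then csl a b i j + 1 else 0


lemma csl_zl (a b : List String) (j : Nat) : csl a b 0 j = 0 := by cases j <;> rfl

lemma csl_zr (a b : List String) (i : Nat) : csl a b i 0 = 0 := by cases i <;> rfl

lemma csl_succ (a b : List String) (i j : Nat) :
    csl a b (i+1) (j+1) = if a.getD i "" = b.getD j "" then csl a b i j + 1 else 0 := rfl

-- max of g over 0..n-1, as the ports' folds compute it
def mmax (g : Nat → Nat) (n : Nat) : Nat :=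
  (List.range n).foldl (fun acc t => max acc (g t)) 0

lemma foldl_max_init (g : Nat → Nat) (l : List Nat) (x : Nat) :
    l.foldl (fun acc t => max acc (g t)) x
      = max x (l.foldl (fun acc t => max acc (g t)) 0) := by
  induction l generalizing x with
  | nil => simp
  | cons h t ih =>
    simp only [List.foldl_cons]
    rw [ih (max x (g h)), ih (max 0 (g h))]
    omega

lemma mmax_succ (g : Nat → Nat) (n : Nat) : mmax g (n+1) = max (mmax g n) (g n) := by
  simp [mmax, List.range_succ]

lemma le_mmax (g : Nat → Nat) {t n : Nat} (h : t < n) : g t ≤ mmax g n := by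
  induction n with
  | zero => omega
  | succ n ih =>
    rw [mmax_succ]
    rcases Nat.lt_succ_iff_lt_or_eq.mp h with h' | h'
    · exact le_trans (ih h') (le_max_left _ _)
    · subst h'; exact le_max_right _ _

lemma mmax_le (g : Nat → Nat) {n M : Nat} (h : ∀ t, t < n → g t ≤ M) : mmax g n ≤ M := by
  induction n with
  | zero => simp [mmax]
  | succ n ih =>
    rw [mmax_succ]
    exact max_le (ih fun t ht => h t (Nat.lt_succ_of_lt ht)) (h n (Nat.lt_succ_self n))

-- max over the whole (1..m)×(1..n) rectangle of csl: the common value of both helpers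
def rect (a b : List String) : Nat :=
  mmax (fun i => mmax (fun j => csl a b (i+1) (j+1)) b.length) a.length

def get2 (dp : List (List Nat)) (r c : Nat) : Nat := (dp.getD r []).getD c 0

lemma getD_set_self {α : Type} (l : List α) (i : Nat) (x d : α) (h : i < l.length) :
    (l.set i x).getD i d = x := by
  simp [List.getD, h]

lemma getD_set_ne {α : Type} (l : List α) {i j : Nat} (x : α) (d : α) (h : i ≠ j) :
    (l.set i x).getD j d = l.getD j d := by
  simp [List.getD, List.getElem?_set_ne h]

lemma innerA (a b : List String) (k : Nat) (hk : k < a.length)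
    (dp0 : List (List Nat)) (mx0 : Nat)
    (Hlen : dp0.length = a.length + 1)
    (Hrow : ∀ r, r < a.length + 1 → (dp0.getD r []).length = b.length + 1)
    (Hval : ∀ r c, c ≤ b.length → get2 dp0 r c = if r ≤ k then csl a b r c else 0) :
    ∀ t, t ≤ b.length →
      ((List.range t).foldl (stepA a b k) (dp0, mx0)).1.length = a.length + 1 ∧
      (∀ r, r < a.length + 1 →
        ((((List.range t).foldl (stepA a b k) (dp0, mx0)).1).getD r []).length = b.length + 1) ∧
      (∀ r c, c ≤ b.length →
        get2 ((List.range t).foldl (stepA a b k) (dp0, mx0)).1 r c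
          = if r ≤ k ∨ (r = k + 1 ∧ c ≤ t) then csl a b r c else 0) ∧
      ((List.range t).foldl (stepA a b k) (dp0, mx0)).2
        = (List.range t).foldl (fun acc j => max acc (csl a b (k+1) (j+1))) mx0 := by
  intro t
  induction t with
  | zero =>
    intro _
    simp only [List.range_zero, List.foldl_nil]
    refine ⟨Hlen, Hrow, ?_, trivial⟩
    intro r c hc
    rw [Hval r c hc]
    split_ifs with h1 h2 <;> first
    | rfl
    | omega
    | (obtain ⟨hr, hc0⟩ : r = k + 1 ∧ c = 0 := by omega
       subst hr; subst hc0
       exact (csl_zr a b (k+1)).symm)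
  | succ t ih =>
    intro ht
    obtain ⟨H1, H2, H3, H4⟩ := ih (by omega)
    rw [List.range_succ]
    simp only [List.foldl_append, List.foldl_cons, List.foldl_nil]
    set st := (List.range t).foldl (stepA a b k) (dp0, mx0) with hst
    simp only [get2] at H3
    by_cases heq : a.getD k "" = b.getD t ""
    · have hread : (st.1.getD k []).getD t 0 = csl a b k t := by
        have h := H3 k t (by omega)
        simpa using h
      have hval : csl a b k t + 1 = csl a b (k+1) (t+1) := by
        rw [csl_succ, if_pos heq]
      have hk1 : k + 1 < st.1.length := by rw [H1]; omega
      have hrowlen : (st.1.getD (k+1) []).length = b.length + 1 := H2 (k+1) (by omega)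
      simp only [stepA, if_pos heq]
      refine ⟨by simpa using H1, ?_, ?_, ?_⟩
      · intro r hr
        by_cases hr1 : r = k + 1
        · subst hr1
          show (((st.1.set (k+1) _).getD (k+1) [])).length = b.length + 1
          rw [getD_set_self _ _ _ _ hk1]
          simpa [List.length_set] using hrowlen
        · show (((st.1.set (k+1) _).getD r [])).length = b.length + 1
          rw [getD_set_ne _ _ _ (Ne.symm hr1)]
          exact H2 r hr
      · intro r c hc
        simp only [get2]
        by_cases hr1 : r = k + 1
        · subst hr1
          show (((st.1.set (k+1) _).getD (k+1) [])).getD c 0 = _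
          rw [getD_set_self _ _ _ _ hk1]
          by_cases hc1 : c = t + 1
          · subst hc1
            rw [getD_set_self _ _ _ _ (by rw [hrowlen]; omega)]
            rw [hread, hval]
            rw [if_pos (by omega : k+1 ≤ k ∨ (k+1 = k + 1 ∧ t+1 ≤ t+1))]
          · rw [getD_set_ne _ _ _ (Ne.symm hc1)]
            rw [H3 (k+1) c hc]
            split_ifs with h1 h2 <;> first | rfl | omega
        · show (((st.1.set (k+1) _).getD r [])).getD c 0 = _
          rw [getD_set_ne _ _ _ (Ne.symm hr1)]
          rw [H3 r c hc]
          split_ifs with h1 h2 <;> first | rfl | omega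
      · show max st.2 ((st.1.getD k []).getD t 0 + 1) = _
        rw [hread, hval, H4]
    · have hval0 : csl a b (k+1) (t+1) = 0 := by rw [csl_succ, if_neg heq]
      simp only [stepA, if_neg heq]
      refine ⟨H1, H2, ?_, ?_⟩
      · intro r c hc
        simp only [get2]
        rw [H3 r c hc]
        split_ifs with h1 h2 <;> first
        | rfl
        | omega
        | (obtain ⟨hr, hc1⟩ : r = k + 1 ∧ c = t + 1 := by omega
           subst hr; subst hc1
           exact hval0.symm)
      · rw [H4, hval0, Nat.max_zero]

lemma getD_replicate_zero (n c : Nat) : (List.replicate n (0:Nat)).getD c 0 = 0 := by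
  rw [List.getD_eq_getElem?_getD, List.getElem?_replicate]
  split_ifs <;> rfl

lemma dp0_row (m n r : Nat) (h : r < m + 1) :
    (((List.range (m+1)).map (fun _ => List.replicate (n+1) (0:Nat))).getD r [])
      = List.replicate (n+1) 0 := by
  rw [List.getD_eq_getElem?_getD, List.getElem?_map, List.getElem?_range h]
  rfl

lemma dp0_get2 (m n r c : Nat) :
    get2 ((List.range (m+1)).map (fun _ => List.replicate (n+1) (0:Nat))) r c = 0 := by
  unfold get2
  by_cases hr : r < m + 1
  · rw [dp0_row m n r hr, getD_replicate_zero]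
  · have hnone : ((List.range (m+1)).map (fun _ => List.replicate (n+1) (0:Nat))).getD r [] = [] := by
      rw [List.getD_eq_getElem?_getD, List.getElem?_eq_none (by simpa using (by omega : m + 1 ≤ r))]
      rfl
    rw [hnone]
    simp [List.getD]

lemma outerA (a b : List String) :
    ∀ k, k ≤ a.length →
      ((List.range k).foldl
          (fun st i => (List.range b.length).foldl (stepA a b i) st)
          ((List.range (a.length+1)).map (fun _ => List.replicate (b.length+1) (0:Nat)), 0)).1.length
        = a.length + 1 ∧
      (∀ r, r < a.length + 1 →
        ((((List.range k).foldl
          (fun st i => (List.range b.length).foldl (stepA a b i) st)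
          ((List.range (a.length+1)).map (fun _ => List.replicate (b.length+1) (0:Nat)), 0)).1).getD r []).length = b.length + 1) ∧
      (∀ r c, c ≤ b.length →
        get2 ((List.range k).foldl
          (fun st i => (List.range b.length).foldl (stepA a b i) st)
          ((List.range (a.length+1)).map (fun _ => List.replicate (b.length+1) (0:Nat)), 0)).1 r c
          = if r ≤ k then csl a b r c else 0) ∧
      ((List.range k).foldl
          (fun st i => (List.range b.length).foldl (stepA a b i) st)
          ((List.range (a.length+1)).map (fun _ => List.replicate (b.length+1) (0:Nat)), 0)).2
        = mmax (fun i => mmax (fun j => csl a b (i+1) (j+1)) b.length) k := by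
  intro k
  induction k with
  | zero =>
    intro _
    simp only [List.range_zero, List.foldl_nil]
    refine ⟨by simp, ?_, ?_, by simp [mmax]⟩
    · intro r hr
      rw [dp0_row a.length b.length r hr]
      simp
    · intro r c _
      rw [dp0_get2]
      split_ifs with h1
      · have hr0 : r = 0 := by omega
        subst hr0
        exact (csl_zl a b c).symm
      · rfl
  | succ k ih =>
    intro hk
    obtain ⟨H1, H2, H3, H4⟩ := ih (by omega)
    rw [show List.range (k+1) = List.range k ++ [k] from List.range_succ]
    simp only [List.foldl_append, List.foldl_cons, List.foldl_nil]
    have key := innerA a b k (by omega)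
      ((List.range k).foldl
          (fun st i => (List.range b.length).foldl (stepA a b i) st)
          ((List.range (a.length+1)).map (fun _ => List.replicate (b.length+1) (0:Nat)), 0)).1
      ((List.range k).foldl
          (fun st i => (List.range b.length).foldl (stepA a b i) st)
          ((List.range (a.length+1)).map (fun _ => List.replicate (b.length+1) (0:Nat)), 0)).2
      H1 H2 H3 b.length le_rfl
    rw [Prod.mk.eta] at key
    obtain ⟨K1, K2, K3, K4⟩ := key
    refine ⟨K1, K2, ?_, ?_⟩
    · intro r c hc
      rw [K3 r c hc]
      split_ifs with h1 h2 <;> first | rfl | omega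
    · rw [K4, H4, foldl_max_init, mmax_succ]
      rfl

lemma max_sub_eq_rect (a b : List String) : max_sub a b = rect a b := by
  show ((List.range a.length).foldl
      (fun st i => (List.range b.length).foldl (stepA a b i) st)
      ((List.range (a.length+1)).map (fun _ => List.replicate (b.length+1) (0:Nat)), 0)).2
    = rect a b
  exact (outerA a b a.length le_rfl).2.2.2

lemma walkW (a b : List String) (i0 j0 : Nat) (hb : i0 = 0 ∨ j0 = 0) :
    ∀ t best0,
      ((List.range t).foldl (stepW a b i0 j0) (0, best0)).1 = csl a b (i0 + t) (j0 + t) ∧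
      ((List.range t).foldl (stepW a b i0 j0) (0, best0)).2
        = (List.range t).foldl (fun acc k => max acc (csl a b (i0 + k + 1) (j0 + k + 1))) best0 := by
  intro t
  induction t with
  | zero =>
    intro best0
    simp only [List.range_zero, List.foldl_nil, Nat.add_zero]
    refine ⟨?_, trivial⟩
    rcases hb with h | h
    · subst h; exact (csl_zl a b j0).symm
    · subst h; exact (csl_zr a b i0).symm
  | succ t ih =>
    intro best0
    obtain ⟨ih1, ih2⟩ := ih best0
    rw [List.range_succ]
    simp only [List.foldl_append, List.foldl_cons, List.foldl_nil]
    have e1 : i0 + (t+1) = (i0 + t) + 1 := by omega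
    have e2 : j0 + (t+1) = (j0 + t) + 1 := by omega
    rw [e1, e2]
    set st := (List.range t).foldl (stepW a b i0 j0) (0, best0) with hst
    by_cases heq : a.getD (i0 + t) "" = b.getD (j0 + t) ""
    · simp only [stepW, if_pos heq]
      constructor
      · show st.1 + 1 = _
        rw [ih1, csl_succ, if_pos heq]
      · show (if st.1 + 1 > st.2 then st.1 + 1 else st.2) = _
        rw [ih1, ih2, csl_succ, if_pos heq]
        split_ifs <;> omega
    · simp only [stepW, if_neg heq]
      constructor
      · show (0 : Nat) = _
        rw [csl_succ, if_neg heq]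
      · show st.2 = _
        rw [ih2, csl_succ, if_neg heq, Nat.max_zero]

lemma lrun_eq_rect (a b : List String) : lrun a b = rect a b := by
  have d1 : ∀ (best i0 : Nat),
      ((List.range (min (a.length - i0) b.length)).foldl (stepW a b i0 0) (0, best)).2
        = max best (mmax (fun k => csl a b (i0 + k + 1) (0 + k + 1))
            (min (a.length - i0) b.length)) := by
    intro best i0
    rw [(walkW a b i0 0 (Or.inr rfl) (min (a.length - i0) b.length) best).2]
    exact foldl_max_init _ _ _
  have d2 : ∀ (best j0 : Nat),
      ((List.range (min a.length (b.length - j0))).foldl (stepW a b 0 j0) (0, best)).2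
        = max best (mmax (fun k => csl a b (0 + k + 1) (j0 + k + 1))
            (min a.length (b.length - j0))) := by
    intro best j0
    rw [(walkW a b 0 j0 (Or.inl rfl) (min a.length (b.length - j0)) best).2]
    exact foldl_max_init _ _ _
  have L1 : (List.range a.length).foldl
      (fun best i0 =>
        ((List.range (min (a.length - i0) b.length)).foldl (stepW a b i0 0) (0, best)).2) 0
      = mmax (fun i0 => mmax (fun k => csl a b (i0 + k + 1) (0 + k + 1))
          (min (a.length - i0) b.length)) a.length := by
    unfold mmax
    apply PySem.List.foldl_congr_mem
    intro acc i0 _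
    exact d1 acc i0
  show (List.range' 1 (b.length - 1)).foldl
      (fun best j0 =>
        ((List.range (min a.length (b.length - j0))).foldl (stepW a b 0 j0) (0, best)).2)
      ((List.range a.length).foldl
        (fun best i0 =>
          ((List.range (min (a.length - i0) b.length)).foldl (stepW a b i0 0) (0, best)).2) 0)
    = rect a b
  rw [L1, List.range'_eq_map_range, List.foldl_map]
  have L2 : (List.range (b.length - 1)).foldl
      (fun best t =>
        ((List.range (min a.length (b.length - (1 + t)))).foldl (stepW a b 0 (1 + t)) (0, best)).2)
      (mmax (fun i0 => mmax (fun k => csl a b (i0 + k + 1) (0 + k + 1))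
          (min (a.length - i0) b.length)) a.length)
      = (List.range (b.length - 1)).foldl
        (fun best t => max best (mmax (fun k => csl a b (0 + k + 1) ((1 + t) + k + 1))
            (min a.length (b.length - (1 + t)))))
        (mmax (fun i0 => mmax (fun k => csl a b (i0 + k + 1) (0 + k + 1))
          (min (a.length - i0) b.length)) a.length) := by
    apply PySem.List.foldl_congr_mem
    intro acc t _
    exact d2 acc (1 + t)
  rw [L2, foldl_max_init]
  have hle1 : mmax (fun i0 => mmax (fun k => csl a b (i0 + k + 1) (0 + k + 1))
      (min (a.length - i0) b.length)) a.length ≤ rect a b := by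
    apply mmax_le
    intro i0 hi0
    apply mmax_le
    intro k hk
    calc csl a b (i0 + k + 1) (0 + k + 1) = csl a b ((i0 + k) + 1) (k + 1) := by
          rw [Nat.zero_add]
      _ ≤ mmax (fun j => csl a b ((i0 + k) + 1) (j + 1)) b.length :=
          le_mmax (fun j => csl a b ((i0 + k) + 1) (j + 1)) (by omega)
      _ ≤ rect a b :=
          le_mmax (fun i => mmax (fun j => csl a b (i + 1) (j + 1)) b.length) (by omega)
  have hle2 : (List.range (b.length - 1)).foldl
      (fun acc t => max acc (mmax (fun k => csl a b (0 + k + 1) ((1 + t) + k + 1))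
          (min a.length (b.length - (1 + t))))) 0 ≤ rect a b := by
    apply mmax_le (fun t => mmax (fun k => csl a b (0 + k + 1) ((1 + t) + k + 1))
        (min a.length (b.length - (1 + t))))
    intro t ht
    apply mmax_le
    intro k hk
    have e : (1 + t) + k + 1 = (t + k + 1) + 1 := by omega
    rw [Nat.zero_add, e]
    calc csl a b (k + 1) ((t + k + 1) + 1)
        ≤ mmax (fun j => csl a b (k + 1) (j + 1)) b.length :=
          le_mmax (fun j => csl a b (k + 1) (j + 1)) (by omega)
      _ ≤ rect a b :=
          le_mmax (fun i => mmax (fun j => csl a b (i + 1) (j + 1)) b.length) (by omega)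
  have hge : rect a b ≤
      max (mmax (fun i0 => mmax (fun k => csl a b (i0 + k + 1) (0 + k + 1))
          (min (a.length - i0) b.length)) a.length)
        ((List.range (b.length - 1)).foldl
          (fun acc t => max acc (mmax (fun k => csl a b (0 + k + 1) ((1 + t) + k + 1))
              (min a.length (b.length - (1 + t))))) 0) := by
    apply mmax_le
    intro i hi
    apply mmax_le
    intro j hj
    by_cases hij : j ≤ i
    · apply le_trans _ (le_max_left _ _)
      calc csl a b (i + 1) (j + 1) = csl a b ((i - j) + j + 1) (0 + j + 1) := by
            have e1 : i - j + j = i := by omega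
            rw [e1, Nat.zero_add]
        _ ≤ mmax (fun k => csl a b ((i - j) + k + 1) (0 + k + 1))
              (min (a.length - (i - j)) b.length) :=
            le_mmax (fun k => csl a b ((i - j) + k + 1) (0 + k + 1)) (by omega)
        _ ≤ mmax (fun i0 => mmax (fun k => csl a b (i0 + k + 1) (0 + k + 1))
              (min (a.length - i0) b.length)) a.length :=
            le_mmax (fun i0 => mmax (fun k => csl a b (i0 + k + 1) (0 + k + 1))
              (min (a.length - i0) b.length)) (by omega)
    · apply le_trans _ (le_max_right _ _)
      calc csl a b (i + 1) (j + 1) = csl a b (0 + i + 1) ((1 + (j - i - 1)) + i + 1) := by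
            have e2 : (1 + (j - i - 1)) + i + 1 = j + 1 := by omega
            rw [Nat.zero_add, e2]
        _ ≤ mmax (fun k => csl a b (0 + k + 1) ((1 + (j - i - 1)) + k + 1))
              (min a.length (b.length - (1 + (j - i - 1)))) :=
            le_mmax (fun k => csl a b (0 + k + 1) ((1 + (j - i - 1)) + k + 1)) (by omega)
        _ ≤ (List.range (b.length - 1)).foldl
              (fun acc t => max acc (mmax (fun k => csl a b (0 + k + 1) ((1 + t) + k + 1))
                  (min a.length (b.length - (1 + t))))) 0 :=
            le_mmax (fun t => mmax (fun k => csl a b (0 + k + 1) ((1 + t) + k + 1))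
              (min a.length (b.length - (1 + t)))) (by omega)
  exact le_antisymm (max_le hle1 hle2) hge

lemma max_sub_eq_lrun (a b : List String) : max_sub a b = lrun a b := by
  rw [max_sub_eq_rect, lrun_eq_rect]

lemma foldl_rel {α β γ : Type} (R : α → β → Prop) (f : α → γ → α) (g : β → γ → β)
    (h : ∀ x y c, R x y → R (f x c) (g y c)) :
    ∀ (l : List γ) (x : α) (y : β), R x y → R (l.foldl f x) (l.foldl g y) := by
  intro l
  induction l with
  | nil => intro x y hxy; exact hxy
  | cons c t ih => intro x y hxy; exact ih _ _ (h x y c hxy)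

lemma step_rel (c c' : Nat) (hcc : c = c') (pair : List String)
    (x : PySem.Dict Nat (List String) × Nat) (y : Nat × Option (List String))
    (h : x.2 = y.1 ∧ x.1.get? x.2 = y.2) :
    (x.1.insert c pair, max x.2 c).2 = (if c' ≥ y.1 then (c', some pair) else y).1 ∧
    ((x.1.insert c pair, max x.2 c).1).get? (x.1.insert c pair, max x.2 c).2
      = (if c' ≥ y.1 then (c', some pair) else y).2 := by
  subst hcc
  obtain ⟨h1, h2⟩ := h
  by_cases hge : c ≥ y.1
  · rw [if_pos hge]
    constructor
    · show max x.2 c = c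
      omega
    · show (x.1.insert c pair).get? (max x.2 c) = some pair
      rw [show max x.2 c = c from by omega]
      apply PySem.Dict.get?_insert_self
  · rw [if_neg hge]
    constructor
    · show max x.2 c = y.1
      omega
    · show (x.1.insert c pair).get? (max x.2 c) = y.2
      rw [show max x.2 c = x.2 from by omega]
      rw [PySem.Dict.get?_insert_of_ne]
      · exact h2
      · omega

lemma scan_rel (ca cb : Nat → Nat → Nat) (hc : ∀ i j, ca i j = cb i j)
    (pr : Nat → Nat → List String) (outer : List Nat) (inner : Nat → List Nat) :
    (outer.foldl (fun st i => (inner i).foldl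
        (fun (st : PySem.Dict Nat (List String) × Nat) j =>
          (st.1.insert (ca i j) (pr i j), max st.2 (ca i j))) st)
      ((PySem.Dict.empty : PySem.Dict Nat (List String)), (0:Nat))).2
      = (outer.foldl (fun st i => (inner i).foldl
          (fun (st : Nat × Option (List String)) j =>
            if cb i j ≥ st.1 then (cb i j, some (pr i j)) else st) st)
        ((0:Nat), (none : Option (List String)))).1
    ∧ ((outer.foldl (fun st i => (inner i).foldl
        (fun (st : PySem.Dict Nat (List String) × Nat) j =>
          (st.1.insert (ca i j) (pr i j), max st.2 (ca i j))) st)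
      ((PySem.Dict.empty : PySem.Dict Nat (List String)), (0:Nat))).1).get?
      (outer.foldl (fun st i => (inner i).foldl
        (fun (st : PySem.Dict Nat (List String) × Nat) j =>
          (st.1.insert (ca i j) (pr i j), max st.2 (ca i j))) st)
      ((PySem.Dict.empty : PySem.Dict Nat (List String)), (0:Nat))).2
      = (outer.foldl (fun st i => (inner i).foldl
          (fun (st : Nat × Option (List String)) j =>
            if cb i j ≥ st.1 then (cb i j, some (pr i j)) else st) st)
        ((0:Nat), (none : Option (List String)))).2 := by
  exact foldl_rel
    (fun (x : PySem.Dict Nat (List String) × Nat) (y : Nat × Option (List String)) =>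
      x.2 = y.1 ∧ x.1.get? x.2 = y.2)
    (fun st i => (inner i).foldl
      (fun (st : PySem.Dict Nat (List String) × Nat) j =>
        (st.1.insert (ca i j) (pr i j), max st.2 (ca i j))) st)
    (fun st i => (inner i).foldl
      (fun (st : Nat × Option (List String)) j =>
        if cb i j ≥ st.1 then (cb i j, some (pr i j)) else st) st)
    (fun x y i hxy => foldl_rel
      (fun (x : PySem.Dict Nat (List String) × Nat) (y : Nat × Option (List String)) =>
        x.2 = y.1 ∧ x.1.get? x.2 = y.2)
      (fun (st : PySem.Dict Nat (List String) × Nat) j =>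
        (st.1.insert (ca i j) (pr i j), max st.2 (ca i j)))
      (fun (st : Nat × Option (List String)) j =>
        if cb i j ≥ st.1 then (cb i j, some (pr i j)) else st)
      (fun x y j hxy => step_rel (ca i j) (cb i j) (hc i j) (pr i j) x y hxy)
      (inner i) x y hxy)
    outer
    ((PySem.Dict.empty : PySem.Dict Nat (List String)), (0:Nat))
    ((0:Nat), (none : Option (List String)))
    ⟨rfl, by simp⟩

lemma find_users_eq (userid_list : List String) (category_list : List (String × List String)) :
    find_users userid_list category_list = find_users_alt userid_list category_list := by
  have h := scan_rel
    (fun i j => max_sub ((PySem.Dict.mk category_list).getD (userid_list.getD i "") [])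
                        ((PySem.Dict.mk category_list).getD (userid_list.getD j "") []))
    (fun i j => lrun ((PySem.Dict.mk category_list).getD (userid_list.getD i "") [])
                     ((PySem.Dict.mk category_list).getD (userid_list.getD j "") []))
    (fun _ _ => max_sub_eq_lrun _ _)
    (fun i j => [userid_list.getD i "", userid_list.getD j ""])
    (List.range userid_list.length)
    (fun i => List.range' (i + 1) (userid_list.length - (i + 1)))
  exact congrArg (fun o : Option (List String) => o.getD []) h.2

-- ===== VERDICT (by name: the statement is the Claim_ definition above) =====
theorem find_users_spec : Claim_equal_find_users := by
  intro ul cl _ _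
  unfold Spec_find_users
  exact find_users_eq ul cl
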